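-- pv_equiv track=rewrite | github.com/alexandraback/datacollection | solutions_5631989306621952_1/Python/rpj/1AALastWord.py | lstWord
-- ===== SOURCE A (Python) =====
-- def lstWord(input):
--     lst = [input[0]]
--     lst2 = []
--     for letter in input[1:]:
--       for word in lst:
--           lst2.append(max('%s%s' % (word, letter), '%s%s' % (letter, word)))
--       lst[:] = lst2
--       lst2 = []
--     return max(lst)
-- ===== SOURCE B (Python) =====
-- def lstWord(input):
--     first = input[0]
--     front = []  # letters sent to the front, in insertion order (result order is reversed)
--     back = []   # letters appended at the back
--     for c in input[1:]:
--         if c >= (front[-1] if front else first):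
--             front.append(c)
--         else:
--             back.append(c)
--     return ''.join(reversed(front)) + first + ''.join(back)
-- ===== Notes on version B (the rewrite author's own statement) =====
-- stated objective: faster
-- what changed: Replaces A's per-letter rebuild via max of two full string concatenations (quadratic work on growing strings) with a single pass that compares each letter to the current first character and collects front/back letter lists, joined once at the end.
import Mathlib
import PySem

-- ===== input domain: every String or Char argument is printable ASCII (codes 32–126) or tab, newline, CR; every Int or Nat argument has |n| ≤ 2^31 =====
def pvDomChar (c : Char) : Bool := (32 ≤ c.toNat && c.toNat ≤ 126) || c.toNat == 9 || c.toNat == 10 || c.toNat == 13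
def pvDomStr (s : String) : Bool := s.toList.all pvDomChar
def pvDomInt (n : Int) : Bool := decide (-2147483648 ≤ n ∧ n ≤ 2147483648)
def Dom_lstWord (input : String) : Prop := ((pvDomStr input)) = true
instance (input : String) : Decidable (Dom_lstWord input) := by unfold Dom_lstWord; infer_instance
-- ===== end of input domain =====

-- B builds the answer in one pass (front/back lists joined once) instead of A's
-- quadratic rebuild of a growing string at every letter: objective 'faster'.
-- A raises IndexError on the empty string (input[0]); Pre_ excludes it.


-- ===== PORT A =====
-- Python string '<' on the char-list side (lexicographic by code point, exact)
def ltChars : List Char → List Char → Bool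
  | [], [] => false
  | [], _ :: _ => true
  | _ :: _, [] => false
  | a :: as, b :: bs => if a < b then true else if b < a then false else ltChars as bs

-- Python max(x, y): y if x < y else x
def pymaxCh (a b : List Char) : List Char := if ltChars a b then b else a

-- the body of A's outer 'for letter in input[1:]' loop (inner loop over lst appends into lst2)
def lstWordAStep (lst : List (List Char)) (letter : Char) : List (List Char) :=
  lst.foldl (fun lst2 word => lst2 ++ [pymaxCh (word ++ [letter]) (letter :: word)]) []

def lstWord (input : String) : String :=
  match input.toList with
  | [] => ""          -- input[0] raises IndexError; excluded by Pre_lstWord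
  | c0 :: rest =>
    let lst := rest.foldl lstWordAStep [[c0]]
    match PySem.List.max? lst (fun w => w) with
    | some w => String.ofList w
    | none => ""      -- max([]) would raise; unreachable (lst is never empty)

-- ===== PORT B =====
-- the body of B's loop: state = (front, back); compare with front[-1] if front else first
def lstWordBStep (first : Char) (s : List Char × List Char) (c : Char) : List Char × List Char :=
  if s.1.getLast?.getD first ≤ c then (s.1 ++ [c], s.2) else (s.1, s.2 ++ [c])

def lstWord_alt (input : String) : String :=
  match input.toList with
  | [] => ""          -- input[0] raises IndexError; excluded by Pre_lstWord
  | first :: rest =>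
    let fb := rest.foldl (lstWordBStep first) ([], [])
    String.ofList (fb.1.reverse ++ first :: fb.2)

-- ===== PRECONDITION & SPEC =====
-- A evaluates input[0], which raises IndexError on the empty string
def Pre_lstWord (input : String) : Prop := input ≠ ""
instance (input : String) : Decidable (Pre_lstWord input) := by unfold Pre_lstWord; infer_instance
def pvWitness_lstWord : String := "ba"

def Spec_lstWord (input : String) (out : String) : Prop := out = lstWord_alt input
instance (input : String) (out : String) : Decidable (Spec_lstWord input out) := by unfold Spec_lstWord; infer_instance

-- ===== CLAIM (what is proved, stated in full; the proofs are below) =====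
def Claim_equal_lstWord : Prop := ∀ (input : String), Dom_lstWord input → Pre_lstWord input → Spec_lstWord input (lstWord input)

-- ===== LEMMAS AND PROOFS =====

-- the word B's state denotes
def wordOf (first : Char) (s : List Char × List Char) : List Char :=
  s.1.reverse ++ first :: s.2

-- if every char of w is ≤ c then w ++ [c] ≤ c :: w in Python's order
lemma ltChars_append_cons (c : Char) :
    ∀ (w : List Char), (∀ x ∈ w, x ≤ c) →
      ltChars (w ++ [c]) (c :: w) = true ∨ w ++ [c] = c :: w := by
  intro w
  induction w with
  | nil => intro _; right; rfl
  | cons a t ih =>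
    intro h
    have ha : a ≤ c := h a (by simp)
    rcases lt_or_eq_of_le ha with hlt | heq
    · left; simp [ltChars, hlt]
    · subst heq
      rcases ih (fun x hx => h x (by simp [hx])) with h1 | h2
      · left; simp [ltChars, h1]
      · right; simp at h2 ⊢; simpa using h2

-- one step: A's pymax on the current word agrees with B's front/back decision,
-- and the "every char ≤ top" invariant is preserved
lemma step_eq (first c : Char) (f b : List Char)
    (hinv : ∀ x ∈ wordOf first (f, b), x ≤ f.getLast?.getD first) :
    pymaxCh (wordOf first (f, b) ++ [c]) (c :: wordOf first (f, b))
      = wordOf first (lstWordBStep first (f, b) c) := by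
  set h := f.getLast?.getD first with hh
  by_cases hc : h ≤ c
  · -- B prepends: result is c :: w
    have hres : wordOf first (lstWordBStep first (f, b) c) = c :: wordOf first (f, b) := by
      simp [lstWordBStep, hh.symm ▸ hc, wordOf]
    rw [hres]
    rcases lt_or_eq_of_le hc with hlt | heq
    · -- h < c : first chars differ, c :: w wins
      have hw : wordOf first (f, b) = h :: (wordOf first (f, b)).tail := by
        cases hf : f.reverse with
        | nil =>
          have : f = [] := by simpa using congrArg List.reverse hf
          simp [wordOf, this, hh]
        | cons x xs =>
          have hx : f.getLast? = some x := by rw [← List.head?_reverse, hf]; rfl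
          simp [wordOf, hf, hh, hx]
      rw [hw]
      simp [pymaxCh, ltChars, hlt]
    · -- h = c : w ++ [c] ≤ c :: w, max is c :: w (or they are equal)
      have hall : ∀ x ∈ wordOf first (f, b), x ≤ c := by
        intro x hx; exact heq ▸ hinv x hx
      rcases ltChars_append_cons c (wordOf first (f, b)) hall with h1 | h2
      · simp [pymaxCh, h1]
      · simp [pymaxCh, h2]
  · -- c < h : B appends; w ++ [c] wins since first char h > c
    have hres : wordOf first (lstWordBStep first (f, b) c)
        = wordOf first (f, b) ++ [c] := by
      simp [lstWordBStep, hh.symm ▸ hc, wordOf]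
    rw [hres]
    have hw : wordOf first (f, b) = h :: (wordOf first (f, b)).tail := by
      cases hf : f.reverse with
      | nil =>
        have : f = [] := by simpa using congrArg List.reverse hf
        simp [wordOf, this, hh]
      | cons x xs =>
        have hx : f.getLast? = some x := by rw [← List.head?_reverse, hf]; rfl
        simp [wordOf, hf, hh, hx]
    rw [hw]
    have hlt : c < h := not_le.mp hc
    simp [pymaxCh, ltChars, not_lt.mpr (le_of_lt hlt), hlt]

-- the invariant is preserved by one B step
lemma inv_step (first c : Char) (f b : List Char)
    (hinv : ∀ x ∈ wordOf first (f, b), x ≤ f.getLast?.getD first) :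
    ∀ x ∈ wordOf first (lstWordBStep first (f, b) c),
      x ≤ (lstWordBStep first (f, b) c).1.getLast?.getD first := by
  by_cases hc : f.getLast?.getD first ≤ c
  · intro x hx
    simp only [lstWordBStep, hc, if_pos] at hx ⊢
    simp only [wordOf] at hx
    simp only [List.getLast?_append, List.getLast?_singleton, Option.or_some] at *
    rcases (by simpa [wordOf] using hx : x ∈ (f ++ [c]).reverse ++ first :: b) with hx'
    have : x ∈ c :: wordOf first (f, b) := by
      simpa [wordOf, List.reverse_append] using hx'
    rcases List.mem_cons.mp this with rfl | hmem
    · exact le_refl _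
    · exact le_trans (hinv x hmem) hc
  · intro x hx
    simp only [lstWordBStep, hc, if_neg, not_false_iff] at hx ⊢
    have : x ∈ wordOf first (f, b) ++ [c] := by
      simpa [wordOf] using hx
    rcases List.mem_append.mp this with hmem | hmem
    · exact hinv x hmem
    · simp at hmem; subst hmem; exact le_of_lt (not_le.mp hc)

-- the whole loop: A's list stays the singleton of B's word
lemma loop_eq (first : Char) :
    ∀ (rest f b : List Char),
      (∀ x ∈ wordOf first (f, b), x ≤ f.getLast?.getD first) →
      rest.foldl lstWordAStep [wordOf first (f, b)]
        = [wordOf first (rest.foldl (lstWordBStep first) (f, b))] := by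
  intro rest
  induction rest with
  | nil => intro f b _; rfl
  | cons c cs ih =>
    intro f b hinv
    have hstep : lstWordAStep [wordOf first (f, b)] c
        = [wordOf first (lstWordBStep first (f, b) c)] := by
      simp [lstWordAStep, ← step_eq first c f b hinv]
    have hB : lstWordBStep first (f, b) c
        = ((lstWordBStep first (f, b) c).1, (lstWordBStep first (f, b) c).2) := rfl
    calc (c :: cs).foldl lstWordAStep [wordOf first (f, b)]
        = cs.foldl lstWordAStep [wordOf first (lstWordBStep first (f, b) c)] := by
          simp [List.foldl_cons, hstep]
      _ = [wordOf first (cs.foldl (lstWordBStep first) (lstWordBStep first (f, b) c))] := by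
          rw [hB]
          exact ih _ _ (by simpa using inv_step first c f b hinv)
      _ = _ := by simp [List.foldl_cons]

-- ===== VERDICT (by name: the statement is the Claim_ definition above) =====
theorem lstWord_spec : Claim_equal_lstWord := by
  intro input _ hpre
  unfold Spec_lstWord lstWord lstWord_alt
  cases hs : input.toList with
  | nil =>
    exact absurd (String.ext (by simpa using hs)) hpre
  | cons c0 rest =>
    have hinv : ∀ x ∈ wordOf c0 (([] : List Char), ([] : List Char)),
        x ≤ ([] : List Char).getLast?.getD c0 := by
      intro x hx; simp [wordOf] at hx; simp [hx]
    have h0 : [[c0]] = [wordOf c0 (([] : List Char), ([] : List Char))] := by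
      simp [wordOf]
    simp only [h0, loop_eq c0 rest [] [] hinv]
    simp [PySem.List.max?, wordOf]
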